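-- pv_equiv track=rewrite | github.com/yamakii/garmin-performance-analysis | tools/rag/queries/form_anomaly_detector.py | _generate_temporal_clusters
-- ===== SOURCE A (Python) =====
-- from typing import Any
--
-- def _generate_temporal_clusters(
--     anomalies: list[dict[str, Any]], cluster_window: int = 300
-- ) -> list[dict[str, int]]:
--     """Generate temporal clusters (5-minute windows by default).
--
--     Args:
--         anomalies: List of anomaly records.
--         cluster_window: Cluster window size in seconds (default: 300 = 5min).
--
--     Returns:
--         List of cluster dicts with start, end, count.
--     """
--     if not anomalies:
--         return []
--
--     # Sort by timestamp
--     sorted_anomalies = sorted(anomalies, key=lambda a: a["timestamp"])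
--
--     # Group into clusters
--     clusters = []
--     current_start = (
--         sorted_anomalies[0]["timestamp"] // cluster_window
--     ) * cluster_window
--     current_count = 0
--
--     for anomaly in sorted_anomalies:
--         anomaly_window = (anomaly["timestamp"] // cluster_window) * cluster_window
--         if anomaly_window == current_start:
--             current_count += 1
--         else:
--             if current_count > 0:
--                 clusters.append(
--                     {
--                         "start": current_start,
--                         "end": current_start + cluster_window,
--                         "count": current_count,
--                     }
--                 )
--             current_start = anomaly_window
--             current_count = 1
--
--     # Add last cluster
--     if current_count > 0:
--         clusters.append(
--             {
--                 "start": current_start,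
--                 "end": current_start + cluster_window,
--                 "count": current_count,
--             }
--         )
--
--     return clusters
-- ===== SOURCE B (Python) =====
-- def _generate_temporal_clusters(anomalies, cluster_window=300):
--     counts = {}
--     for a in anomalies:
--         w = (a["timestamp"] // cluster_window) * cluster_window
--         counts[w] = counts.get(w, 0) + 1
--     return [
--         {"start": w, "end": w + cluster_window, "count": counts[w]}
--         for w in sorted(counts)
--     ]
-- ===== Notes on version B (the rewrite author's own statement) =====
-- stated objective: simpler
-- what changed: B replaces A's full sort of the records plus a stateful running current_start/current_count grouping pass by a dict of per-window counts built in one pass over the unsorted input, then emits the cluster records over the sorted distinct window keys.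
import Mathlib
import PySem

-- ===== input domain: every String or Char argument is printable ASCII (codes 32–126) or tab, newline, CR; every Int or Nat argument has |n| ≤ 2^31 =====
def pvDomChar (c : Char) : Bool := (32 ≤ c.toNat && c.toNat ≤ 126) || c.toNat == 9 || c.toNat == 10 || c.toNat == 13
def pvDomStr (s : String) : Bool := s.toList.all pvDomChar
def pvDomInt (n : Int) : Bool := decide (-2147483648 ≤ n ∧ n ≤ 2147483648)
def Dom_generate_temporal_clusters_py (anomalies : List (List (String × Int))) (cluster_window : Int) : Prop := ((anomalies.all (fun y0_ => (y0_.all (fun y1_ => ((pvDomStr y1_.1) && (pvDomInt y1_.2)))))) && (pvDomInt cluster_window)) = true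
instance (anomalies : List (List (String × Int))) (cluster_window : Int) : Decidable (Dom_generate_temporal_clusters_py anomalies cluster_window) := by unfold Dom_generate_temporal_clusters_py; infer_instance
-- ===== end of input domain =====

-- B replaces A's full sort + running current_start/current_count grouping pass by a dict of per-window
-- counts built in input order, then emits records over the sorted distinct window keys (objective: simpler).
-- Equivalence proved for every cluster_window ≠ 0 and records that carry a "timestamp" key (elsewhere Python raises).

-- shared helpers: both Pythons read a["timestamp"] and compute (ts // cluster_window) * cluster_window
def pvTs (a : List (String × Int)) : Int := ((PySem.Dict.mk a).get? "timestamp").getD 0  -- Pre_ guarantees the key is present (Python: KeyError otherwise)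
def pvKey (cluster_window : Int) (a : List (String × Int)) : Int :=
  (PySem.Int.floordiv (pvTs a) cluster_window) * cluster_window
def pvRec (cluster_window start count : Int) : List (String × Int) :=
  [("start", start), ("end", start + cluster_window), ("count", count)]

-- ===== PORT A =====
-- A's loop body and trailing flush, on the running state (current_start, current_count, clusters)
def pvStepA (cluster_window : Int) (st : Int × Int × List (List (String × Int))) (w : Int) :
    Int × Int × List (List (String × Int)) :=
  if w = st.1 then (st.1, st.2.1 + 1, st.2.2)
  else (w, 1, if st.2.1 > 0 then st.2.2 ++ [pvRec cluster_window st.1 st.2.1] else st.2.2)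
def pvFinA (cluster_window : Int) (r : Int × Int × List (List (String × Int))) :
    List (List (String × Int)) :=
  if r.2.1 > 0 then r.2.2 ++ [pvRec cluster_window r.1 r.2.1] else r.2.2

def generate_temporal_clusters_py (anomalies : List (List (String × Int))) (cluster_window : Int) : List (List (String × Int)) :=
  if anomalies = [] then []
  else
    let sorted_anomalies := PySem.List.sorted anomalies pvTs false
    -- sorted_anomalies[0] on the (nonempty) sorted list
    let init : Int × Int × List (List (String × Int)) :=
      (pvKey cluster_window (sorted_anomalies.headD []), 0, [])
    pvFinA cluster_window
      (sorted_anomalies.foldl (fun st a => pvStepA cluster_window st (pvKey cluster_window a)) init)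

-- ===== PORT B =====
def generate_temporal_clusters_py_alt (anomalies : List (List (String × Int))) (cluster_window : Int) : List (List (String × Int)) :=
  let counts : PySem.Dict Int Int :=
    anomalies.foldl
      (fun d a => d.insert (pvKey cluster_window a) (d.getD (pvKey cluster_window a) 0 + 1))
      PySem.Dict.empty
  (PySem.List.sorted counts.keys (fun w => w) false).map
    (fun w => pvRec cluster_window w (counts.getD w 0))

-- ===== PRECONDITION & SPEC =====
-- Pre_ excludes exactly the inputs where Python A raises: a record without a "timestamp" key (KeyError)
-- and cluster_window = 0 paired with a nonempty list (ZeroDivisionError); with no anomalies both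
-- programs return before any division, so that case stays admitted for every cluster_window.
def Pre_generate_temporal_clusters_py (anomalies : List (List (String × Int))) (cluster_window : Int) : Prop :=
  (anomalies = [] ∨ cluster_window ≠ 0) ∧
    ∀ a ∈ anomalies, (PySem.Dict.mk a).contains "timestamp" = true
instance (anomalies : List (List (String × Int))) (cluster_window : Int) : Decidable (Pre_generate_temporal_clusters_py anomalies cluster_window) := by unfold Pre_generate_temporal_clusters_py; infer_instance
def pvWitness_generate_temporal_clusters_py : (List (List (String × Int))) × Int :=
  ([[("timestamp", 10)], [("timestamp", 700)], [("timestamp", 20)]], 300)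

def Spec_generate_temporal_clusters_py (anomalies : List (List (String × Int))) (cluster_window : Int) (out : List (List (String × Int))) : Prop := out = generate_temporal_clusters_py_alt anomalies cluster_window
instance (anomalies : List (List (String × Int))) (cluster_window : Int) (out : List (List (String × Int))) : Decidable (Spec_generate_temporal_clusters_py anomalies cluster_window out) := by unfold Spec_generate_temporal_clusters_py; infer_instance

-- ===== CLAIM (what is proved, stated in full; the proofs are below) =====
def Claim_equal_generate_temporal_clusters_py : Prop := ∀ (anomalies : List (List (String × Int))) (cluster_window : Int), Dom_generate_temporal_clusters_py anomalies cluster_window → Pre_generate_temporal_clusters_py anomalies cluster_window → Spec_generate_temporal_clusters_py anomalies cluster_window (generate_temporal_clusters_py anomalies cluster_window)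

-- ===== LEMMAS AND PROOFS =====

-- the window-start map t ↦ (t // cw) * cw is monotone for every cw ≠ 0
lemma pvWin_mono (cw t1 t2 : Int) (hcw : cw ≠ 0) (h : t1 ≤ t2) :
    PySem.Int.floordiv t1 cw * cw ≤ PySem.Int.floordiv t2 cw * cw := by
  have e1 := PySem.Int.floordiv_mul_add_mod t1 cw
  have e2 := PySem.Int.floordiv_mul_add_mod t2 cw
  rcases lt_or_gt_of_ne hcw with hneg | hpos
  · have hb1 := PySem.Int.mod_neg_bounds t1 hneg
    have hb2 := PySem.Int.mod_neg_bounds t2 hneg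
    by_contra hlt
    push_neg at hlt
    have hq : PySem.Int.floordiv t1 cw + 1 ≤ PySem.Int.floordiv t2 cw := by
      by_contra hq'
      push_neg at hq'
      have hq2 : PySem.Int.floordiv t2 cw ≤ PySem.Int.floordiv t1 cw := by omega
      have := mul_le_mul_of_nonpos_right hq2 (le_of_lt hneg)
      linarith
    have := mul_le_mul_of_nonpos_right hq (le_of_lt hneg)
    rw [add_mul, one_mul] at this
    linarith
  · have hm1 : 0 ≤ PySem.Int.mod t1 cw := PySem.Int.mod_nonneg t1 hpos
    have hm2 : PySem.Int.mod t2 cw < cw := PySem.Int.mod_lt t2 hpos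
    by_contra hlt
    push_neg at hlt
    have hq : PySem.Int.floordiv t2 cw + 1 ≤ PySem.Int.floordiv t1 cw := by
      by_contra hq'
      push_neg at hq'
      have hq2 : PySem.Int.floordiv t1 cw ≤ PySem.Int.floordiv t2 cw := by omega
      have := mul_le_mul_of_nonneg_right hq2 (le_of_lt hpos)
      linarith
    have := mul_le_mul_of_nonneg_right hq (le_of_lt hpos)
    rw [add_mul, one_mul] at this
    linarith

lemma pvKey_mono (cw : Int) (hcw : cw ≠ 0) (a b : List (String × Int)) (h : pvTs a ≤ pvTs b) :
    pvKey cw a ≤ pvKey cw b := pvWin_mono cw _ _ hcw h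

-- folding Set.add from a seed whose head is x: the head pops out, duplicates of x are skipped
lemma pvFoldlAdd_cons_out (t : List Int) : ∀ (s : List Int) (x : Int),
    List.foldl PySem.Set.add (x :: s) t
      = x :: List.foldl PySem.Set.add s (t.filter (fun y => decide (y ≠ x))) := by
  induction t with
  | nil => intro s x; rfl
  | cons y t ih =>
    intro s x
    by_cases hyx : y = x
    · subst hyx
      have hc : PySem.Set.add (y :: s) y = y :: s := by
        simp [PySem.Set.add, PySem.Set.contains]
      simp only [List.foldl_cons, List.filter_cons, hc]
      simp only [ne_eq, not_true_eq_false, decide_false, Bool.false_eq_true, if_false]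
      exact ih s y
    · have hc : PySem.Set.add (x :: s) y = x :: PySem.Set.add s y := by
        by_cases hys : y ∈ s <;>
          simp [PySem.Set.add, PySem.Set.contains, hyx, hys]
      simp only [List.foldl_cons, List.filter_cons, hyx, ne_eq, not_false_eq_true, decide_true,
        if_true, hc]
      exact ih (PySem.Set.add s y) x

lemma pvOfList_cons (x : Int) (t : List Int) :
    PySem.Set.ofList (x :: t) = x :: PySem.Set.ofList (t.filter (fun y => decide (y ≠ x))) := by
  rw [PySem.Set.ofList_eq_foldl, PySem.Set.ofList_eq_foldl]
  have : List.foldl PySem.Set.add [] (x :: t) = List.foldl PySem.Set.add [x] t := by rfl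
  rw [this]
  exact pvFoldlAdd_cons_out t [] x

lemma pvOfList_sublist (t : List Int) : ∀ s : List Int,
    ∃ u, List.foldl PySem.Set.add s t = s ++ u ∧ u.Sublist t := by
  induction t with
  | nil => intro s; exact ⟨[], by simp⟩
  | cons x t ih =>
    intro s
    by_cases hc : PySem.Set.contains s x = true
    · have hmem : x ∈ s := by simpa [PySem.Set.contains] using hc
      have : PySem.Set.add s x = s := by simp [PySem.Set.add, PySem.Set.contains, hmem]
      obtain ⟨u, hu, hsub⟩ := ih s
      exact ⟨u, by simpa [this] using hu, hsub.cons _⟩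
    · have hmem : x ∉ s := by simpa [PySem.Set.contains] using hc
      have : PySem.Set.add s x = s ++ [x] := by simp [PySem.Set.add, PySem.Set.contains, hmem]
      obtain ⟨u, hu, hsub⟩ := ih (s ++ [x])
      exact ⟨x :: u, by simpa [this, List.append_assoc] using hu, hsub.cons₂ _⟩

lemma pvOfList_sublist' (l : List Int) : (PySem.Set.ofList l).Sublist l := by
  obtain ⟨u, hu, hsub⟩ := pvOfList_sublist l []
  rw [PySem.Set.ofList_eq_foldl, hu]
  simpa using hsub

-- A's grouping pass over a nondecreasing list of window values, characterised
lemma pvGroup (cw : Int) : ∀ (l : List Int) (st cnt : Int) (cls : List (List (String × Int))),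
    0 < cnt → l.Pairwise (· ≤ ·) → (∀ x ∈ l, st ≤ x) →
    pvFinA cw (l.foldl (pvStepA cw) (st, cnt, cls))
      = cls ++ pvRec cw st (cnt + l.count st)
          :: (PySem.Set.ofList (l.filter (fun y => decide (y ≠ st)))).map
              (fun w => pvRec cw w (l.count w)) := by
  intro l
  induction l with
  | nil =>
    intro st cnt cls hcnt _ _
    simp [pvFinA, hcnt, PySem.Set.ofList]
  | cons x t ih =>
    intro st cnt cls hcnt hpw hall
    have hx : ∀ y ∈ t, x ≤ y := (List.pairwise_cons.mp hpw).1
    have hpt : t.Pairwise (· ≤ ·) := (List.pairwise_cons.mp hpw).2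
    by_cases hxs : x = st
    · subst hxs
      have hstep : pvStepA cw (x, cnt, cls) x = (x, cnt + 1, cls) := by simp [pvStepA]
      rw [List.foldl_cons, hstep, ih x (cnt + 1) cls (by omega) hpt hx]
      simp only [List.count_cons_self, List.filter_cons, ne_eq, not_true_eq_false, decide_false,
        Bool.false_eq_true, if_false]
      congr 1
      congr 1
      · congr 1
        push_cast
        ring
      · apply List.map_congr_left
        intro w hw
        have hw' : w ∈ t.filter (fun y => decide (y ≠ x)) := (PySem.Set.mem_ofList _ _).mp hw
        have hwx : ¬(w = x) := by
          have := List.of_mem_filter hw'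
          simpa using this
        have hxw : ¬(x = w) := fun hh => hwx hh.symm
        simp [hxw]
    · have hlt : st < x := lt_of_le_of_ne (hall x (List.mem_cons_self)) (fun h => hxs h.symm)
      have hstep : pvStepA cw (st, cnt, cls) x = (x, 1, cls ++ [pvRec cw st cnt]) := by
        simp [pvStepA, hxs, hcnt]
      rw [List.foldl_cons, hstep,
        ih x 1 (cls ++ [pvRec cw st cnt]) (by omega) hpt hx]
      have htne : ∀ y ∈ t, y ≠ st := fun y hy => by
        have := hx y hy; omega
      have hcount0 : (x :: t).count st = 0 := by
        rw [List.count_eq_zero]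
        intro hmem
        rcases List.mem_cons.mp hmem with h | h
        · exact hxs h.symm
        · exact htne st h rfl
      have hfilt : (x :: t).filter (fun y => decide (y ≠ st)) = x :: t := by
        rw [List.filter_eq_self]
        intro y hy
        rcases List.mem_cons.mp hy with h | h
        · subst h; simp [hxs]
        · simp [htne y h]
      have hc1 : (((x :: t).count x : Nat) : Int) = 1 + (t.count x : Int) := by
        rw [List.count_cons_self]
        push_cast
        ring
      rw [hcount0, hfilt, pvOfList_cons, List.map_cons, hc1, List.append_assoc,
        List.singleton_append]
      simp only [Nat.cast_zero, add_zero]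
      congr 1
      congr 1
      congr 1
      apply List.map_congr_left
      intro w hw
      have hw' : w ∈ t.filter (fun y => decide (y ≠ x)) := (PySem.Set.mem_ofList _ _).mp hw
      have hwx : ¬(w = x) := by
        have := List.of_mem_filter hw'
        simpa using this
      have hxw : ¬(x = w) := fun hh => hwx hh.symm
      simp [hxw]

-- B's counting dict, characterised: per-key counts over the list of window values
lemma pvCounts_getD (ws : List Int) (v : Int) :
    (ws.foldl (fun d x => d.insert x (d.getD x 0 + 1)) PySem.Dict.empty).getD v 0
      = (ws.count v : Int) := by
  rw [PySem.Dict.getD_foldl_insert_add_one]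
  simp [PySem.Dict.getD_empty]

-- ===== VERDICT (by name: the statement is the Claim_ definition above) =====

theorem generate_temporal_clusters_py_spec : Claim_equal_generate_temporal_clusters_py := by
  intro anomalies cw _ hpre
  unfold Spec_generate_temporal_clusters_py
  obtain ⟨hcw0, _⟩ := hpre
  by_cases hnil : anomalies = []
  · subst hnil
    rfl
  · have hcw : cw ≠ 0 := by tauto
    obtain ⟨h, tt, hs⟩ : ∃ h tt, PySem.List.sorted anomalies pvTs false = h :: tt := by
      rcases hsrt : PySem.List.sorted anomalies pvTs false with _ | ⟨h, tt⟩
      · exact absurd ((PySem.List.sorted_eq_nil_iff anomalies pvTs false).mp hsrt) hnil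
      · exact ⟨h, tt, rfl⟩
    have hperm : (PySem.List.sorted anomalies pvTs false).Perm anomalies :=
      PySem.List.sorted_perm anomalies pvTs false
    have hpw : (PySem.List.sorted anomalies pvTs false).Pairwise (fun a b => pvTs a ≤ pvTs b) :=
      PySem.List.sorted_pairwise anomalies pvTs
    have hpwk : ((PySem.List.sorted anomalies pvTs false).map (pvKey cw)).Pairwise (· ≤ ·) := by
      rw [List.pairwise_map]
      exact hpw.imp (fun hle => pvKey_mono cw hcw _ _ hle)
    have hwsperm :
        ((PySem.List.sorted anomalies pvTs false).map (pvKey cw)).Perm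
          (anomalies.map (pvKey cw)) := hperm.map (pvKey cw)
    have hsortedkeys :
        PySem.List.sorted (PySem.Set.ofList (anomalies.map (pvKey cw))) (fun w => w) false
          = PySem.Set.ofList ((PySem.List.sorted anomalies pvTs false).map (pvKey cw)) := by
      apply PySem.List.sorted_eq_of_perm_of_pairwise_lt
      · exact (List.perm_ext_iff_of_nodup
          (PySem.Set.nodup_ofList ((PySem.List.sorted anomalies pvTs false).map (pvKey cw)))
          (PySem.Set.nodup_ofList (anomalies.map (pvKey cw)))).mpr (fun a => by
            rw [PySem.Set.mem_ofList, PySem.Set.mem_ofList]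
            exact hwsperm.mem_iff)
      · have hsub := pvOfList_sublist' ((PySem.List.sorted anomalies pvTs false).map (pvKey cw))
        have hle := hpwk.sublist hsub
        have hnd : (PySem.Set.ofList
            ((PySem.List.sorted anomalies pvTs false).map (pvKey cw))).Pairwise (· ≠ ·) :=
          PySem.Set.nodup_ofList _
        exact (hle.and hnd).imp (fun hp => lt_of_le_of_ne hp.1 hp.2)
    have hcnt_all : ∀ v : Int,
        (anomalies.map (pvKey cw)).count v
          = ((PySem.List.sorted anomalies pvTs false).map (pvKey cw)).count v :=
      fun v => (hwsperm.count_eq v).symm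
    show generate_temporal_clusters_py anomalies cw = _
    unfold generate_temporal_clusters_py generate_temporal_clusters_py_alt
    simp only [hnil, if_false]
    rw [← List.foldl_map (f := pvKey cw)
        (g := fun (d : PySem.Dict Int Int) x => d.insert x (d.getD x 0 + 1)),
      ← List.foldl_map (f := pvKey cw) (g := pvStepA cw)]
    rw [PySem.Dict.keys_foldl_insert (anomalies.map (pvKey cw))
      (fun d x => d.getD x 0 + 1) PySem.Dict.empty]
    have hupd : PySem.Set.update (PySem.Dict.empty : PySem.Dict Int Int).keys
        (anomalies.map (pvKey cw)) = PySem.Set.ofList (anomalies.map (pvKey cw)) := rfl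
    rw [hupd, hsortedkeys]
    simp only [pvCounts_getD]
    simp only [hcnt_all]
    rw [hs]
    simp only [List.map_cons, List.headD_cons, List.foldl_cons]
    have hstep0 : pvStepA cw (pvKey cw h, 0, []) (pvKey cw h)
        = (pvKey cw h, 1, ([] : List (List (String × Int)))) := by
      simp [pvStepA]
    rw [hstep0]
    have htail_pw : ((tt.map (pvKey cw))).Pairwise (· ≤ ·) := by
      rw [hs] at hpwk
      exact (List.pairwise_cons.mp (by simpa using hpwk)).2
    have htail_ge : ∀ x ∈ tt.map (pvKey cw), pvKey cw h ≤ x := by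
      rw [hs] at hpwk
      exact (List.pairwise_cons.mp (by simpa using hpwk)).1
    rw [pvGroup cw (tt.map (pvKey cw)) (pvKey cw h) 1 [] (by omega) htail_pw htail_ge]
    rw [pvOfList_cons, List.map_cons, List.nil_append]
    congr 1
    · congr 1
      rw [List.count_cons_self]
      push_cast
      ring
    · apply List.map_congr_left
      intro w hw
      have hw' : w ∈ (tt.map (pvKey cw)).filter (fun y => decide (y ≠ pvKey cw h)) :=
        (PySem.Set.mem_ofList _ _).mp hw
      have hwx : ¬(w = pvKey cw h) := by
        have := List.of_mem_filter hw'
        simpa using this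
      have hxw : ¬(pvKey cw h = w) := fun hh => hwx hh.symm
      simp [hxw]
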